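-- pv_equiv track=rewrite | github.com/nithyashreeur/enershift-simulator | storage.py | simulate_battery
-- ===== SOURCE A (Python) =====
-- def simulate_battery(demand, generation, capacity=100, initial=50):
--     soc = initial
--     soc_list = []
--
--     for d, g in zip(demand, generation):
--         net = g - d
--         soc += net
--         soc = max(0, min(soc, capacity))  # Clamp between 0 and capacity
--         soc_list.append(soc)
--
--     return soc_list
-- ===== SOURCE B (Python) =====
-- def simulate_battery(demand, generation, capacity=100, initial=50):
--     def go(soc, pairs):
--         # returns (soc trace, final soc)
--         n = len(pairs)
--         if n == 0:
--             return [], soc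
--         if n == 1:
--             d, g = pairs[0]
--             s = max(0, min(soc + (g - d), capacity))
--             return [s], s
--         mid = n // 2
--         left, s1 = go(soc, pairs[:mid])
--         right, s2 = go(s1, pairs[mid:])
--         return left + right, s2
--     return go(initial, list(zip(demand, generation)))[0]
-- ===== Notes on version B (the rewrite author's own statement) =====
-- stated objective: alternative
-- what changed: Replaces the imperative accumulator loop by a divide-and-conquer recursion that splits the zipped pairs in half, simulates the left half, threads its final state into the right half, and concatenates the two traces.
import Mathlib
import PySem

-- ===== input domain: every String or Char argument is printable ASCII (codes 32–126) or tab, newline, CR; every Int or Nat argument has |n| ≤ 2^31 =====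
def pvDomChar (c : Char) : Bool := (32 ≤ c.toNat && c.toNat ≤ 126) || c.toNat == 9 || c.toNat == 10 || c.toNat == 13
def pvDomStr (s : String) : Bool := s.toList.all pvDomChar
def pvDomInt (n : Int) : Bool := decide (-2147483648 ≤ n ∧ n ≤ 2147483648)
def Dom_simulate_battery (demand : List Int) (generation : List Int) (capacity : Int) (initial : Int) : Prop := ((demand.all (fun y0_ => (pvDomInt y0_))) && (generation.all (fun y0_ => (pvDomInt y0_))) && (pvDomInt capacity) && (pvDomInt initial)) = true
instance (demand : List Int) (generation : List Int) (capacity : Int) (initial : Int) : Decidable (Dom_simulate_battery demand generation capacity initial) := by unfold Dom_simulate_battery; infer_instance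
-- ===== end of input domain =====

-- B replaces A's in-place accumulator loop by a cons-building structural recursion over the zipped pairs; same values, no speed claim.
-- ===== PORT A =====
-- loop: for d, g in zip(demand, generation): net = g - d; soc += net; soc = max(0, min(soc, capacity)); soc_list.append(soc)
def simulate_battery (demand : List Int) (generation : List Int) (capacity : Int) (initial : Int) : List Int :=
  ((demand.zip generation).foldl
    (fun (st : Int × List Int) dg =>
      let net := dg.2 - dg.1
      let soc := st.1 + net
      let soc := max 0 (min soc capacity)
      (soc, st.2 ++ [soc]))
    (initial, [])).2

-- ===== PORT B =====
-- B: divide-and-conquer — split the pairs at mid, simulate the left half, thread its final soc into the right half.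
def simulate_battery_alt_go (capacity : Int) (soc : Int) (ps : List (Int × Int)) : List Int × Int :=
  match ps with
  | [] => ([], soc)
  | [(d, g)] =>
      let s := max 0 (min (soc + (g - d)) capacity)
      ([s], s)
  | a :: b :: rest =>
      let mid := (a :: b :: rest).length / 2
      let l := simulate_battery_alt_go capacity soc ((a :: b :: rest).take mid)
      let r := simulate_battery_alt_go capacity l.2 ((a :: b :: rest).drop mid)
      (l.1 ++ r.1, r.2)
termination_by ps.length
decreasing_by
  · simp [List.length_take]; omega
  · simp [List.length_drop]; omega

def simulate_battery_alt (demand : List Int) (generation : List Int) (capacity : Int) (initial : Int) : List Int :=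
  (simulate_battery_alt_go capacity initial (demand.zip generation)).1

-- ===== PRECONDITION & SPEC =====
def Spec_simulate_battery (demand : List Int) (generation : List Int) (capacity : Int) (initial : Int) (out : List Int) : Prop := out = simulate_battery_alt demand generation capacity initial
instance (demand : List Int) (generation : List Int) (capacity : Int) (initial : Int) (out : List Int) : Decidable (Spec_simulate_battery demand generation capacity initial out) := by unfold Spec_simulate_battery; infer_instance

-- ===== CLAIM (what is proved, stated in full; the proofs are below) =====
def Claim_equal_simulate_battery : Prop := ∀ (demand : List Int) (generation : List Int) (capacity : Int) (initial : Int), Dom_simulate_battery demand generation capacity initial → Spec_simulate_battery demand generation capacity initial (simulate_battery demand generation capacity initial)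

-- ===== LEMMAS AND PROOFS =====

-- proof helper: the straight-line state-passing simulation, connecting both ports
def pvLin (capacity : Int) (soc : Int) : List (Int × Int) → List Int × Int
  | [] => ([], soc)
  | (d, g) :: rest =>
      let s := max 0 (min (soc + (g - d)) capacity)
      let r := pvLin capacity s rest
      (s :: r.1, r.2)

lemma pvLin_append (capacity : Int) :
    ∀ (ps qs : List (Int × Int)) (soc : Int),
      pvLin capacity soc (ps ++ qs)
        = ((pvLin capacity soc ps).1 ++ (pvLin capacity (pvLin capacity soc ps).2 qs).1,
           (pvLin capacity (pvLin capacity soc ps).2 qs).2) := by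
  intro ps
  induction ps with
  | nil => intro qs soc; simp [pvLin]
  | cons hd tl ih =>
      intro qs soc
      obtain ⟨d, g⟩ := hd
      simp [pvLin, ih]

lemma alt_go_eq_pvLin (capacity : Int) :
    ∀ (n : Nat) (ps : List (Int × Int)), ps.length ≤ n → ∀ soc,
      simulate_battery_alt_go capacity soc ps = pvLin capacity soc ps := by
  intro n
  induction n with
  | zero =>
      intro ps h soc
      have : ps = [] := List.length_eq_zero_iff.mp (Nat.le_zero.mp h)
      subst this
      simp [simulate_battery_alt_go, pvLin]
  | succ n ih =>
      intro ps h soc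
      match ps with
      | [] => simp [simulate_battery_alt_go, pvLin]
      | [(d, g)] => simp [simulate_battery_alt_go, pvLin]
      | (a :: b :: rest) =>
          rw [simulate_battery_alt_go]
          have hn : rest.length + 2 ≤ n + 1 := by simpa using h
          have h1 : ((a :: b :: rest).take ((a :: b :: rest).length / 2)).length ≤ n := by
            simp only [List.length_take, List.length_cons]; omega
          have h2 : ((a :: b :: rest).drop ((a :: b :: rest).length / 2)).length ≤ n := by
            simp only [List.length_drop, List.length_cons]; omega
          rw [ih _ h1, ih _ h2]
          conv_rhs => rw [← List.take_append_drop ((a :: b :: rest).length / 2) (a :: b :: rest)]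
          rw [pvLin_append]

lemma foldl_eq_pvLin (capacity : Int) :
    ∀ (ps : List (Int × Int)) (soc : Int) (acc : List Int),
      (ps.foldl
        (fun (st : Int × List Int) dg =>
          let net := dg.2 - dg.1
          let soc := st.1 + net
          let soc := max 0 (min soc capacity)
          (soc, st.2 ++ [soc]))
        (soc, acc)).2 = acc ++ (pvLin capacity soc ps).1 := by
  intro ps
  induction ps with
  | nil => intro soc acc; simp [pvLin]
  | cons hd tl ih =>
      intro soc acc
      obtain ⟨d, g⟩ := hd
      simp only [List.foldl, pvLin, ih]
      simp


-- ===== VERDICT (by name: the statement is the Claim_ definition above) =====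
theorem simulate_battery_spec : Claim_equal_simulate_battery := by
  intro demand generation capacity initial _
  unfold Spec_simulate_battery simulate_battery simulate_battery_alt
  rw [alt_go_eq_pvLin capacity (demand.zip generation).length _ (Nat.le_refl _)]
  simpa using foldl_eq_pvLin capacity (demand.zip generation) initial []
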